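-- pv_equiv track=rewrite | github.com/tahira489/project7 | project3.py | reverse_used_bits
-- ===== SOURCE A (Python) =====
-- def reverse_used_bits(n):
--     result = 0
--     num_bits = n.bit_length()
--
--     for _ in range(num_bits):
--         result <<= 1
--         result |= (n & 1)
--         n >>= 1
--
--     return result
-- ===== SOURCE B (Python) =====
-- def reverse_used_bits(n):
--     nb = n.bit_length()
--     return sum(((n >> i) & 1) << (nb - 1 - i) for i in range(nb))
-- ===== Notes on version B (the rewrite author's own statement) =====
-- stated objective: alternative
-- what changed: A accumulates the result with a shift-left-and-OR loop while destructively halving n; B never mutates n and instead sums each bit, read directly by shifting n right and masking, placed at its final mirrored position.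
import Mathlib
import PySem

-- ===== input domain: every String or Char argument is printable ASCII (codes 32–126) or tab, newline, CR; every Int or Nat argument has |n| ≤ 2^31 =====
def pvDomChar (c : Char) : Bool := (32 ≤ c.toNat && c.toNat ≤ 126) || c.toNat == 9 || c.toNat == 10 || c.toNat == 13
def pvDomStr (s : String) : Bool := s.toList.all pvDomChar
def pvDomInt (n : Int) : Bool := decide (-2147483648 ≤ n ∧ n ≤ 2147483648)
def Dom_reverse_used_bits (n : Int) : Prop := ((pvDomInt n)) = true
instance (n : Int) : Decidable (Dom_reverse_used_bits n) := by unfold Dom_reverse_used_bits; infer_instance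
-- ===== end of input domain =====

-- B replaces A's destructive shift-and-or accumulator loop by a non-destructive sum of
-- each bit placed directly at its mirrored position (objective: alternative).

-- ===== PORT A =====
-- for _ in range(num_bits): result <<= 1; result |= (n & 1); n >>= 1
def reverse_used_bits (n : Int) : Int :=
  let numBits := PySem.Int.bitLength n
  ((List.range numBits).foldl
    (fun (st : Int × Int) _ =>
      (PySem.Int.bor (st.1 <<< (1 : Nat)) (PySem.Int.band st.2 1), st.2 >>> (1 : Nat)))
    ((0 : Int), n)).1

-- ===== PORT B =====
-- nb = n.bit_length(); return sum(((n >> i) & 1) << (nb - 1 - i) for i in range(nb))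
def reverse_used_bits_alt (n : Int) : Int :=
  let nb := PySem.Int.bitLength n
  (List.range nb).foldl
    (fun (acc : Int) (i : Nat) => acc + (PySem.Int.band (n >>> i) 1) <<< (nb - 1 - i)) 0

-- ===== PRECONDITION & SPEC =====
def Spec_reverse_used_bits (n : Int) (out : Int) : Prop := out = reverse_used_bits_alt n
instance (n : Int) (out : Int) : Decidable (Spec_reverse_used_bits n out) := by unfold Spec_reverse_used_bits; infer_instance

-- ===== CLAIM (what is proved, stated in full; the proofs are below) =====
def Claim_equal_reverse_used_bits : Prop := ∀ (n : Int), Dom_reverse_used_bits n → Spec_reverse_used_bits n (reverse_used_bits n)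

-- ===== LEMMAS AND PROOFS =====

-- A's loop body, named for the proofs (identical to the lambda in the port).
def pvStep (st : Int × Int) (_ : Nat) : Int × Int :=
  (PySem.Int.bor (st.1 <<< (1 : Nat)) (PySem.Int.band st.2 1), st.2 >>> (1 : Nat))

-- proof-side recursion characterising both programs' value
def placeBits : Int → Nat → Int
  | _, 0 => 0
  | m, k + 1 => (PySem.Int.band m 1) <<< k + placeBits (m >>> (1 : Nat)) k

lemma two_mul_lor_one (a : Nat) : 2 * a ||| 1 = 2 * a + 1 := by
  have h := Nat.lor_bit false a true 0
  simpa [Nat.bit] using h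

lemma placeBits_succ (m : Int) (k : Nat) :
    placeBits m (k + 1) = (PySem.Int.band m 1) <<< k + placeBits (m >>> (1 : Nat)) k := rfl

lemma step_fst (r n : Int) (hr : 0 ≤ r) :
    PySem.Int.bor (r <<< (1 : Nat)) (PySem.Int.band n 1) = 2 * r + PySem.Int.mod n 2 := by
  rw [PySem.Int.band_one]
  have h0 : 0 ≤ PySem.Int.mod n 2 := PySem.Int.mod_nonneg n (by norm_num)
  have h1 : PySem.Int.mod n 2 < 2 := PySem.Int.mod_lt n (by norm_num)
  have hsh : r <<< (1 : Nat) = 2 * r := by rw [Int.shiftLeft_eq]; ring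
  rcases (by omega : PySem.Int.mod n 2 = 0 ∨ PySem.Int.mod n 2 = 1) with h | h
  · rw [h, PySem.Int.bor_zero, hsh]; ring
  · rw [h, hsh, PySem.Int.bor_of_nonneg (by omega) (by norm_num)]
    have ht : (2 * r).toNat = 2 * r.toNat := by omega
    rw [ht]
    have h1t : ((1 : Int)).toNat = 1 := rfl
    rw [h1t, two_mul_lor_one]
    omega

lemma fold_spec : ∀ (l : List Nat) (r n : Int), 0 ≤ r →
    ((l.foldl pvStep (r, n)).1 = r * 2 ^ l.length + placeBits n l.length) := by
  intro l
  induction l with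
  | nil => intro r n _; simp [placeBits]
  | cons a l ih =>
    intro r n hr
    have hstep : pvStep (r, n) a = (2 * r + PySem.Int.mod n 2, n >>> (1 : Nat)) := by
      unfold pvStep
      rw [step_fst r n hr]
    have hmn : 0 ≤ PySem.Int.mod n 2 := PySem.Int.mod_nonneg n (by norm_num)
    rw [List.foldl_cons, hstep, ih (2 * r + PySem.Int.mod n 2) (n >>> (1 : Nat)) (by omega),
        List.length_cons, placeBits_succ, PySem.Int.band_one, Int.shiftLeft_eq]
    ring

lemma shiftRight_add' (n : Int) (i : Nat) : n >>> (i + 1) = (n >>> (1 : Nat)) >>> i := by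
  simp [Int.shiftRight_eq_div_pow, Int.ediv_ediv_of_nonneg, pow_succ, mul_comm]

-- B's foldl as a Finset sum
lemma foldl_add_eq_sum (g : Nat → Int) : ∀ (k : Nat),
    (List.range k).foldl (fun acc i => acc + g i) 0 = ∑ i ∈ Finset.range k, g i := by
  intro k
  induction k with
  | zero => simp
  | succ k ih =>
    rw [List.range_succ, List.foldl_append, ih, List.foldl_cons, List.foldl_nil,
        Finset.sum_range_succ]

lemma sum_place : ∀ (k : Nat) (n : Int),
    (∑ i ∈ Finset.range k, (PySem.Int.band (n >>> i) 1) <<< (k - 1 - i)) = placeBits n k := by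
  intro k
  induction k with
  | zero => intro n; simp [placeBits]
  | succ k ih =>
    intro n
    rw [Finset.sum_range_succ']
    have h0 : (PySem.Int.band (n >>> (0 : Nat)) 1) <<< (k + 1 - 1 - 0)
        = (PySem.Int.band n 1) <<< k := by norm_num
    have hterm : ∀ i : Nat, (PySem.Int.band (n >>> (i + 1)) 1) <<< (k + 1 - 1 - (i + 1))
        = (PySem.Int.band ((n >>> (1 : Nat)) >>> i) 1) <<< (k - 1 - i) := by
      intro i
      rw [shiftRight_add']
      congr 1
      omega
    rw [h0, Finset.sum_congr rfl (fun i _ => hterm i), ih, placeBits_succ]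
    ring

-- ===== VERDICT (by name: the statement is the Claim_ definition above) =====
theorem reverse_used_bits_spec : Claim_equal_reverse_used_bits := by
  intro n _
  show reverse_used_bits n = reverse_used_bits_alt n
  have hA : reverse_used_bits n
      = ((List.range (PySem.Int.bitLength n)).foldl pvStep ((0 : Int), n)).1 := rfl
  have hB : reverse_used_bits_alt n
      = (List.range (PySem.Int.bitLength n)).foldl
          (fun (acc : Int) (i : Nat) =>
            acc + (PySem.Int.band (n >>> i) 1) <<< (PySem.Int.bitLength n - 1 - i)) 0 := rfl
  rw [hA, hB, fold_spec _ 0 n le_rfl, List.length_range,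
      foldl_add_eq_sum (fun i => (PySem.Int.band (n >>> i) 1) <<< (PySem.Int.bitLength n - 1 - i)),
      sum_place]
  ring
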